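-- pv_equiv track=rewrite | github.com/TelosSteward/TELOS | tests/scenarios/test_saai_drift_scenarios.py | _generate_baseline_messages
-- ===== SOURCE A (Python) =====
-- def _generate_baseline_messages(count: int) -> list:
--     """Generate `count` on-topic property assessment messages for baseline.
--
--     All messages must match substring keys in conftest.py embedding maps
--     (_ON_TOPIC_EMBEDDINGS or _SAAI_DRIFT_EMBEDDINGS) to produce valid
--     fidelity scores. Messages that don't match fall to drift_default
--     and produce ESCALATE.
--     """
--     # These all match embedding keys in conftest.py
--     templates = [
--         "Look up property at 742 Evergreen Terrace, Springfield IL",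
--         "Retrieve the latest aerial imagery for this parcel",
--         "Run AI roof condition assessment",
--         "What are the hail and wind vulnerability scores?",
--         "Check the roof condition on the next property",
--         "Show me the aerial photograph for this address",
--         "Generate the full underwriting property report",
--         "Review steady on-topic 1 for this property",
--         "Assess steady on-topic 2 for the imagery",
--         "Analyze steady on-topic 3 on the roof",
--         "Calculate steady on-topic 4 for perils",
--         "Produce steady on-topic 5 final report",
--         "Look up steady on-topic 6 address details",
--         "Retrieve steady on-topic 7 aerial coverage",
--         "Score steady on-topic 8 peril exposure",
--         "Generate steady on-topic 9 assessment",
--         "Complete steady on-topic 10 review",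
--         "What's the hail risk for this address?",
--         "Is this roof in good condition?",
--         "Generate the report for this property",
--         "Look up property data for verification",
--         "Run the peril vulnerability scores again",
--     ]
--     messages = []
--     for i in range(count):
--         messages.append(templates[i % len(templates)])
--     return messages
-- ===== SOURCE B (Python) =====
-- def _generate_baseline_messages(count: int) -> list:
--     """Generate `count` on-topic property assessment messages for baseline."""
--     templates = [
--         "Look up property at 742 Evergreen Terrace, Springfield IL",
--         "Retrieve the latest aerial imagery for this parcel",
--         "Run AI roof condition assessment",
--         "What are the hail and wind vulnerability scores?",
--         "Check the roof condition on the next property",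
--         "Show me the aerial photograph for this address",
--         "Generate the full underwriting property report",
--         "Review steady on-topic 1 for this property",
--         "Assess steady on-topic 2 for the imagery",
--         "Analyze steady on-topic 3 on the roof",
--         "Calculate steady on-topic 4 for perils",
--         "Produce steady on-topic 5 final report",
--         "Look up steady on-topic 6 address details",
--         "Retrieve steady on-topic 7 aerial coverage",
--         "Score steady on-topic 8 peril exposure",
--         "Generate steady on-topic 9 assessment",
--         "Complete steady on-topic 10 review",
--         "What's the hail risk for this address?",
--         "Is this roof in good condition?",
--         "Generate the report for this property",
--         "Look up property data for verification",
--         "Run the peril vulnerability scores again",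
--     ]
--     if count <= 0:
--         return []
--     k = (count + len(templates) - 1) // len(templates)
--     return (templates * k)[:count]
-- ===== Notes on version B (the rewrite author's own statement) =====
-- stated objective: idiomatic
-- what changed: Replaces the per-index loop with modular indexing by replicating the template list ceil(count/len) times and slicing the first count elements; no range loop and no modulo per element.
import Mathlib
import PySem

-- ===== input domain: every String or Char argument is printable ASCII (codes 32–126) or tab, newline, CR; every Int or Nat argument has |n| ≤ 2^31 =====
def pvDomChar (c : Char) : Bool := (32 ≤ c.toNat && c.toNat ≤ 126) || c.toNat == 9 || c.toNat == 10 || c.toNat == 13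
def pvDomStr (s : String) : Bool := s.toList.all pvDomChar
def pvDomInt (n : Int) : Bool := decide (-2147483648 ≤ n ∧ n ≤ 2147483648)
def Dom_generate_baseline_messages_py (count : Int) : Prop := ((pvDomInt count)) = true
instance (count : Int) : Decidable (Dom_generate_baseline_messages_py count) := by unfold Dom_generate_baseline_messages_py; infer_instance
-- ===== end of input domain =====

-- B replaces A's index loop with per-element modulo by replicating the template list
-- ceil(count/22) times and slicing the first `count` elements (objective: idiomatic).

-- The fixed template list both Python versions carry verbatim (a shared constant, not logic).
def pvTemplates : List String := [
  "Look up property at 742 Evergreen Terrace, Springfield IL",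
  "Retrieve the latest aerial imagery for this parcel",
  "Run AI roof condition assessment",
  "What are the hail and wind vulnerability scores?",
  "Check the roof condition on the next property",
  "Show me the aerial photograph for this address",
  "Generate the full underwriting property report",
  "Review steady on-topic 1 for this property",
  "Assess steady on-topic 2 for the imagery",
  "Analyze steady on-topic 3 on the roof",
  "Calculate steady on-topic 4 for perils",
  "Produce steady on-topic 5 final report",
  "Look up steady on-topic 6 address details",
  "Retrieve steady on-topic 7 aerial coverage",
  "Score steady on-topic 8 peril exposure",
  "Generate steady on-topic 9 assessment",
  "Complete steady on-topic 10 review",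
  "What's the hail risk for this address?",
  "Is this roof in good condition?",
  "Generate the report for this property",
  "Look up property data for verification",
  "Run the peril vulnerability scores again"]

-- ===== PORT A =====
-- for i in range(count): messages.append(templates[i % len(templates)])
-- templates[i % 22]: i % 22 is always in range, so pyGetD with default "" is exact.
def generate_baseline_messages_py (count : Int) : List String :=
  (PySem.List.pyRange 0 count 1).foldl
    (fun messages i => messages ++ [PySem.List.pyGetD pvTemplates (PySem.Int.mod i 22) ""]) []

-- ===== PORT B =====
-- if count <= 0: return []
-- k = (count + 22 - 1) // 22; return (templates * k)[:count]
def generate_baseline_messages_py_alt (count : Int) : List String :=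
  if count ≤ 0 then []
  else
    PySem.List.slice
      ((List.replicate (PySem.Int.floordiv (count + 22 - 1) 22).toNat pvTemplates).flatten)
      none (some count)

-- ===== PRECONDITION & SPEC =====
def Spec_generate_baseline_messages_py (count : Int) (out : List String) : Prop := out = generate_baseline_messages_py_alt count
instance (count : Int) (out : List String) : Decidable (Spec_generate_baseline_messages_py count out) := by unfold Spec_generate_baseline_messages_py; infer_instance

-- ===== CLAIM (what is proved, stated in full; the proofs are below) =====
def Claim_equal_generate_baseline_messages_py : Prop := ∀ (count : Int), Dom_generate_baseline_messages_py count → Spec_generate_baseline_messages_py count (generate_baseline_messages_py count)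

-- ===== LEMMAS AND PROOFS =====

lemma pv_getElem?_flatten_replicate {α : Type} (l : List α) (K i : Nat) (h : i < l.length * K) :
    ((List.replicate K l).flatten)[i]? = l[i % l.length]? := by
  induction K generalizing i with
  | zero => simp at h
  | succ K ih =>
    rw [Nat.mul_succ] at h
    rcases Nat.eq_zero_or_pos l.length with h0 | hL
    · simp [h0] at h
    simp only [List.replicate_succ, List.flatten_cons]
    by_cases hi : i < l.length
    · rw [List.getElem?_append_left hi, Nat.mod_eq_of_lt hi]
    · rw [List.getElem?_append_right (by omega), ih (i - l.length) (by omega)]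
      conv_rhs => rw [Nat.mod_eq_sub_mod (by omega)]

lemma pv_take_flatten_replicate (K n : Nat) (h : n ≤ pvTemplates.length * K) :
    ((List.replicate K pvTemplates).flatten).take n
      = (List.range n).map (fun k => pvTemplates.getD (k % 22) "") := by
  apply List.ext_getElem?
  intro i
  by_cases hi : i < n
  · rw [List.getElem?_take_of_lt hi,
      pv_getElem?_flatten_replicate pvTemplates K i (by simp [pvTemplates] at h ⊢; omega),
      List.getElem?_map, List.getElem?_range hi]
    have h22 : pvTemplates.length = 22 := by simp [pvTemplates]
    simp only [Option.map_some]
    rw [h22, List.getD_eq_getElem?_getD,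
      List.getElem?_eq_getElem (by rw [h22]; exact Nat.mod_lt _ (by norm_num))]
    simp
  · rw [List.getElem?_eq_none (by simp; omega), List.getElem?_eq_none (by simp; omega)]

lemma pv_portA_eq_map (count : Int) :
    generate_baseline_messages_py count
      = (List.range count.toNat).map (fun k => pvTemplates.getD (k % 22) "") := by
  unfold generate_baseline_messages_py
  rw [PySem.List.foldl_append_singleton_eq_map, PySem.List.pyRange_one]
  simp only [Int.sub_zero, List.map_map, List.nil_append]
  refine List.map_congr_left ?_
  intro k _
  simp only [Function.comp, zero_add]
  have hmod : PySem.Int.mod (k : Int) 22 = ((k % 22 : Nat) : Int) := by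
    rw [PySem.Int.mod_eq_emod_of_pos (by norm_num)]
    omega
  rw [hmod, PySem.List.pyGetD_natCast]

-- ===== VERDICT (by name: the statement is the Claim_ definition above) =====
theorem generate_baseline_messages_py_spec : Claim_equal_generate_baseline_messages_py := by
  intro count _
  unfold Spec_generate_baseline_messages_py generate_baseline_messages_py_alt
  by_cases hc : count ≤ 0
  · rw [pv_portA_eq_map]
    simp [hc, Int.toNat_of_nonpos hc]
  · rw [if_neg hc, pv_portA_eq_map]
    set n : Nat := count.toNat with hn
    have hcount : count = (n : Int) := by simp at hc; omega
    have hk : (PySem.Int.floordiv (count + 22 - 1) 22).toNat = (n + 21) / 22 := by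
      rw [PySem.Int.floordiv_eq_ediv_of_pos (by norm_num)]
      omega
    rw [hk, hcount, PySem.List.slice_to_natCast,
      pv_take_flatten_replicate _ n (by simp [pvTemplates]; omega)]
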